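-- pv_equiv track=rewrite | github.com/Tink-Bell/StenoBee | stenobee/assets/2_convert_proper.py | encode_word
-- ===== SOURCE A (Python) =====
-- letter_order = "^XKPMSHLTJQCNRDGFVBZ-OAEI"
--
-- vowel_mapping = {
-- 'W': 'OA',	'U': 'OI',	'Y': 'EI',
-- 'w': 'OA',	'u': 'OI',	'y': 'EI',
-- }
--
-- def encode_word(word):
--     encoded_word = ""
--     found_vowel_group = False
--
--     for letter in letter_order:
--         if letter == '-' or letter in word:
--             if letter in vowel_mapping.keys():
--                 if found_vowel_group:
--                     encoded_word += "-"
--                 found_vowel_group = True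
--                 encoded_word += letter
--             else:
--                 encoded_word += letter
--
--     # Remove trailing '-' if there are no vowels in the word
--     if not found_vowel_group:
--         encoded_word = encoded_word.rstrip('-')
--
--     return encoded_word  # Change this line to return a string instead of a list
-- ===== SOURCE B (Python) =====
-- letter_order = "^XKPMSHLTJQCNRDGFVBZ-OAEI"
--
-- def encode_word(word):
--     rank = {c: i for i, c in enumerate(letter_order)}
--     cands = {'-'} | (set(word) & set(rank))
--     return ''.join(sorted(cands, key=lambda c: rank[c])).rstrip('-')
-- ===== Notes on version B (the rewrite author's own statement) =====
-- stated objective: alternative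
-- what changed: B builds a rank table from letter_order once, collects the candidate set {'-'} | (set(word) & set(letter_order)), sorts it by rank and joins, instead of scanning the fixed 25-char order and testing membership in word for each; the dead vowel_mapping branch (its keys never occur in letter_order, so found_vowel_group is always False) is dropped.
import Mathlib
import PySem

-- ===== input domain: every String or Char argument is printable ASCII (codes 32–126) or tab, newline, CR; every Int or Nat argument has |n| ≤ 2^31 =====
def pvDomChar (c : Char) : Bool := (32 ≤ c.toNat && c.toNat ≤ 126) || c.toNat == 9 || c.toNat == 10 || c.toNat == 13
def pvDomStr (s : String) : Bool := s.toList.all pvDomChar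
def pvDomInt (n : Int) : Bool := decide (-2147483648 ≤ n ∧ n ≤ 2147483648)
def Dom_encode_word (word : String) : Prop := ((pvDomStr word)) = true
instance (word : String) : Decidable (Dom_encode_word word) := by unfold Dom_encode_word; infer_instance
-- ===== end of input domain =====

-- B replaces A's scan of the fixed 25-char order (membership test in word per char) by
-- sorting the word's candidate letters with a rank table built from letter_order,
-- dropping the dead vowel_mapping branch; objective: alternative decomposition.

-- shared module constant letter_order
def letterOrder : List Char :=
  ['^','X','K','P','M','S','H','L','T','J','Q','C','N','R','D','G','F','V','B','Z','-','O','A','E','I']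

-- s.rstrip('-') on the char list: drop trailing '-' characters (hand port, exact:
-- Python's rstrip('-') removes exactly the maximal trailing run of '-')
def rstripDash (cs : List Char) : List Char := (cs.reverse.dropWhile (fun c => c = '-')).reverse

-- ===== PORT A =====
-- module constant vowel_mapping (keys are 1-char strings, ported as Char keys)
def vowelMapping : PySem.Dict Char String :=
  PySem.Dict.ofList [('W', "OA"), ('U', "OI"), ('Y', "EI"), ('w', "OA"), ('u', "OI"), ('y', "EI")]

-- A's loop body ('letter in word' for the 1-char string letter is exactly char membership)
def encodeStep (word : String) (st : List Char × Bool) (letter : Char) : List Char × Bool :=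
  if letter = '-' || word.toList.contains letter then
    if (vowelMapping.keys).contains letter then
      ((if st.2 then st.1 ++ ['-'] else st.1) ++ [letter], true)
    else
      (st.1 ++ [letter], st.2)
  else st

def encode_word (word : String) : String :=
  let st := letterOrder.foldl (encodeStep word) ([], false)
  String.ofList (if st.2 = false then rstripDash st.1 else st.1)

-- ===== PORT B =====
-- rank = {c: i for i, c in enumerate(letter_order)}  (closed term, lifted to a helper)
def pvRank : PySem.Dict Char Int :=
  (PySem.List.enumerate letterOrder 0).foldl (fun d p => d.insert p.2 p.1) PySem.Dict.empty

-- cands = {'-'} | (set(word) & set(rank))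
def pvCands (word : String) : PySem.Set Char :=
  PySem.Set.union (PySem.Set.ofList ['-'])
    (PySem.Set.inter (PySem.Set.ofList word.toList) (PySem.Dict.keys pvRank))

-- rank[c]: every candidate is a key of rank, so getD is exact (no KeyError occurs)
def encode_word_alt (word : String) : String :=
  String.ofList (rstripDash
    (PySem.List.sorted (pvCands word) (fun c => (pvRank.get? c).getD 0) false))

-- ===== PRECONDITION & SPEC =====
def Spec_encode_word (word : String) (out : String) : Prop := out = encode_word_alt word
instance (word : String) (out : String) : Decidable (Spec_encode_word word out) := by unfold Spec_encode_word; infer_instance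

-- ===== CLAIM (what is proved, stated in full; the proofs are below) =====
def Claim_equal_encode_word : Prop := ∀ (word : String), Dom_encode_word word → Spec_encode_word word (encode_word word)

-- ===== LEMMAS AND PROOFS =====

-- the common intermediate value: letter_order filtered to '-' and the word's letters
def pvKept (word : String) : List Char :=
  letterOrder.filter (fun c => c = '-' || word.toList.contains c)

-- A's loop never meets a vowel_mapping key, so found stays false and it just filters
theorem pvFoldA (word : String) (L : List Char)
    (h : ∀ c ∈ L, (vowelMapping.keys).contains c = false) (acc : List Char) :
    L.foldl (encodeStep word) (acc, false)
      = (acc ++ L.filter (fun c => c = '-' || word.toList.contains c), false) := by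
  induction L generalizing acc with
  | nil => simp
  | cons c L ih =>
    have hc := h c (List.mem_cons_self)
    have hL : ∀ x ∈ L, (vowelMapping.keys).contains x = false :=
      fun x hx => h x (List.mem_cons_of_mem _ hx)
    rw [List.foldl_cons]
    have hc' : c ∉ vowelMapping.keys := by simpa using hc
    by_cases hp : (decide (c = '-') || word.toList.contains c) = true
    · have hp' : c = '-' ∨ c ∈ word.toList := by simpa using hp
      have hstep : encodeStep word (acc, false) c = (acc ++ [c], false) := by
        simp [encodeStep, hp', hc']
      rw [hstep, ih hL]
      simp only [List.filter_cons]
      rw [if_pos (by simpa using hp')]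
      simp
    · have hp' : ¬ (c = '-' ∨ c ∈ word.toList) := by simpa using hp
      have hstep : encodeStep word (acc, false) c = (acc, false) := by
        simp [encodeStep, hp']
      rw [hstep, ih hL]
      simp only [List.filter_cons]
      rw [if_neg (by simpa using hp')]

theorem pvNoVowelKeys : ∀ c ∈ letterOrder, (vowelMapping.keys).contains c = false := by
  intro c hc
  have h := List.all_eq_true.mp
    (by decide : letterOrder.all (fun c => !(vowelMapping.keys).contains c) = true) c hc
  simpa using h

theorem pvA_eq (word : String) : encode_word word = String.ofList (rstripDash (pvKept word)) := by
  unfold encode_word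
  rw [pvFoldA word letterOrder pvNoVowelKeys []]
  simp [pvKept]

set_option maxRecDepth 4000 in
theorem pvKeys_rank : PySem.Dict.keys pvRank = letterOrder := by decide

set_option maxRecDepth 4000 in
theorem pvPairwise_rank :
    letterOrder.Pairwise (fun a b => ((pvRank.get? a).getD 0 : Int) < (pvRank.get? b).getD 0) := by
  decide

theorem pvB_eq (word : String) : encode_word_alt word = String.ofList (rstripDash (pvKept word)) := by
  unfold encode_word_alt
  congr 2
  apply PySem.List.sorted_eq_of_perm_of_pairwise_lt
  · -- pvKept word is a permutation of the candidate set
    unfold pvKept pvCands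
    rw [List.perm_ext_iff_of_nodup
      (List.Nodup.filter _ (by decide : letterOrder.Nodup))
      (PySem.Set.nodup_union _ _ (PySem.Set.nodup_ofList _))]
    intro a
    have hd : ('-') ∈ letterOrder := by decide
    simp only [pvKeys_rank, List.mem_filter, PySem.Set.mem_union,
      PySem.Set.mem_inter, PySem.Set.mem_ofList, List.mem_singleton, Bool.or_eq_true,
      decide_eq_true_iff, List.contains_iff_mem]
    constructor
    · rintro ⟨hmem, h | h⟩
      · exact Or.inl h
      · exact Or.inr ⟨h, hmem⟩
    · rintro (h | ⟨hw, hm⟩)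
      · exact ⟨h ▸ hd, Or.inl h⟩
      · exact ⟨hm, Or.inr hw⟩
  · -- the kept letters appear in strictly increasing rank order
    exact List.Pairwise.sublist List.filter_sublist pvPairwise_rank

-- ===== VERDICT (by name: the statement is the Claim_ definition above) =====
theorem encode_word_spec : Claim_equal_encode_word := by
  intro word _
  unfold Spec_encode_word
  rw [pvA_eq, pvB_eq]
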